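-- pv_equiv track=rewrite | github.com/mario-bermonti/wdiff | wanalysis.py | swap_q_for_k_check
-- ===== SOURCE A (Python) =====
-- def swap_q_for_k_check(word):
--     """Checks how many q's in the word word sound like k's so they can be
--     swapped with k's by mistake.
--     """
--
--     qCompliantCount = 0
--     qCount = word.count("q")
--     qPositions = list()
--     start = 0
--
--     while qCount > 0:
--         qPosition = word.find("q", start)
--         qPositions.append(qPosition)
--         start = qPosition + 1
--         qCount -= 1
--
--     for position in qPositions:
--         if position == (len(word) - 1):
--             continue
--         if (word[position+1] == "u" and
--                 (word[position+2] == "e" or word[position+2] == "i")):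
--             qCompliantCount += 1
--
--     return qCompliantCount
-- ===== SOURCE B (Python) =====
-- def swap_q_for_k_check(word):
--     """Checks how many q's in the word word sound like k's so they can be
--     swapped with k's by mistake.
--     """
--     qCompliantCount = 0
--     for i, c in enumerate(word):
--         if c == "q" and word[i+1:i+3] in ("ue", "ui"):
--             qCompliantCount += 1
--     return qCompliantCount
-- ===== Notes on version B (the rewrite author's own statement) =====
-- stated objective: simpler
-- what changed: B replaces A's two-phase scheme (count the q's, then rebuild their positions one str.find at a time, then re-index into the word) with one forward enumerate scan that compares the two-character slice after each 'q' against 'ue'/'ui'; slicing never raises, so B also returns where A crashes.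
-- outside the precondition, e.g. on swap_q_for_k_check('qu'): A raises IndexError, B returns 0
-- crash fix: On words ending in 'qu' A raises IndexError (unguarded word[position+2]); B returns the count of the remaining compliant q's (0 for 'qu'). — e.g. on swap_q_for_k_check("qu"): A raises IndexError, B returns 0
import Mathlib
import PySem

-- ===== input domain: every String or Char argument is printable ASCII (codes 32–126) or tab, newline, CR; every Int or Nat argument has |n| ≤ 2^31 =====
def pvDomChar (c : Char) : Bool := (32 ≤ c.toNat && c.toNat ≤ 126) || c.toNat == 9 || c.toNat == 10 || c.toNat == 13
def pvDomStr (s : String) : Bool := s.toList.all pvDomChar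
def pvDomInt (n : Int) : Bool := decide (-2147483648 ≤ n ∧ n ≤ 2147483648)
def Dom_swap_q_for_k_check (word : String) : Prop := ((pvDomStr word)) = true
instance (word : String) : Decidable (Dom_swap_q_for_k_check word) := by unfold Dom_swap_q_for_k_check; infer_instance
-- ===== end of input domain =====

-- B replaces A's two-phase count/find position harvesting with a single enumerate scan
-- comparing the slice word[i+1:i+3] with "ue"/"ui" (objective: simpler).

-- ===== PORT A =====
-- the while loop: runs qCount times, each round word.find("q", start), appending the hit
def pvAPositions (word : String) : Nat → Int → List Int
  | 0, _ => []
  | qCount + 1, start =>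
    let qPosition := PySem.Str.findFrom word "q" start
    qPosition :: pvAPositions word qCount (qPosition + 1)

def swap_q_for_k_check (word : String) : Int :=
  let qCount := PySem.Str.count word "q"
  let qPositions := pvAPositions word qCount 0
  qPositions.foldl
    (fun qCompliantCount position =>
      if position = PySem.Str.len word - 1 then qCompliantCount
      else
        -- word[position+1] / word[position+2]: in-range wherever Python returns (Pre_ excludes
        -- the IndexError inputs); the ' ' default is never consulted on those inputs
        if PySem.List.pyGetD word.toList (position + 1) ' ' = 'u' ∧
           (PySem.List.pyGetD word.toList (position + 2) ' ' = 'e' ∨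
            PySem.List.pyGetD word.toList (position + 2) ' ' = 'i')
        then qCompliantCount + 1 else qCompliantCount) 0

-- ===== PORT B =====
def swap_q_for_k_check_alt (word : String) : Int :=
  (PySem.List.enumerate word.toList 0).foldl
    (fun qCompliantCount p =>
      if p.2 = 'q' ∧ (PySem.List.slice word.toList (some (p.1 + 1)) (some (p.1 + 3)) = ['u', 'e'] ∨
                      PySem.List.slice word.toList (some (p.1 + 1)) (some (p.1 + 3)) = ['u', 'i'])
      then qCompliantCount + 1 else qCompliantCount) 0

-- ===== PRECONDITION & SPEC =====
-- Pre_ excludes exactly the words ending in "qu": there A's unguarded word[position+2] raises IndexError.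
def Pre_swap_q_for_k_check (word : String) : Prop := PySem.Str.endswith word "qu" = false
instance (word : String) : Decidable (Pre_swap_q_for_k_check word) := by unfold Pre_swap_q_for_k_check; infer_instance

def pvWitness_swap_q_for_k_check : String := "quick queen qus"

-- On words ending in "qu" A raises IndexError (unguarded word[position+2]); B returns the count of the remaining compliant q's.
def Raises_swap_q_for_k_check (word : String) : Prop := PySem.Str.endswith word "qu" = true
instance (word : String) : Decidable (Raises_swap_q_for_k_check word) := by unfold Raises_swap_q_for_k_check; infer_instance
def pvRaiseWitness_swap_q_for_k_check : String := "qu"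
def pvRaiseWitnessOut_swap_q_for_k_check : Int := 0

def Spec_swap_q_for_k_check (word : String) (out : Int) : Prop := out = swap_q_for_k_check_alt word
instance (word : String) (out : Int) : Decidable (Spec_swap_q_for_k_check word out) := by unfold Spec_swap_q_for_k_check; infer_instance

-- ===== CLAIM (what is proved, stated in full; the proofs are below) =====
def Claim_equal_swap_q_for_k_check : Prop := ∀ (word : String), Dom_swap_q_for_k_check word → Pre_swap_q_for_k_check word → Spec_swap_q_for_k_check word (swap_q_for_k_check word)
def Claim_raises_swap_q_for_k_check : Prop := (∀ (word : String), Dom_swap_q_for_k_check word → Raises_swap_q_for_k_check word → ¬ Pre_swap_q_for_k_check word) ∧ (Dom_swap_q_for_k_check (pvRaiseWitness_swap_q_for_k_check) ∧ Raises_swap_q_for_k_check (pvRaiseWitness_swap_q_for_k_check) ∧ swap_q_for_k_check_alt (pvRaiseWitness_swap_q_for_k_check) = pvRaiseWitnessOut_swap_q_for_k_check)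

-- ===== LEMMAS AND PROOFS =====

-- singleton prefix reads the head (not found in Mathlib/PySem by search)
theorem pv_singleton_prefix_iff (c : Char) (l : List Char) : [c] <+: l ↔ l.head? = some c := by
  cases l with
  | nil => simp
  | cons h t => simp [List.cons_prefix_cons, eq_comm]

-- Python's str.count of a single character is List.count
theorem pv_count_go_singleton (c : Char) : ∀ (fuel : Nat) (l : List Char) (acc : Nat),
    l.length ≤ fuel → PySem.Chars.count.go [c] fuel l acc = acc + l.count c := by
  intro fuel
  induction fuel with
  | zero => intro l acc h; rw [PySem.Chars.count.go]; cases l <;> simp_all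
  | succ n ih =>
    intro l acc h
    cases l with
    | nil => rw [PySem.Chars.count.go]; simp; omega
    | cons x t =>
      rw [PySem.Chars.count.go]
      simp only [List.isPrefixOf, Bool.and_true, List.length_nil,
        Nat.zero_add, List.drop_succ_cons, List.drop_zero, List.length_cons] at *
      by_cases hx : (c == x) = true
      · have hcx : c = x := by simpa using hx
        subst hcx
        simp only [hx, if_true]
        rw [ih t (acc + 1) (by omega)]
        simp
        omega
      · simp only [Bool.not_eq_true] at hx
        simp only [hx, Bool.false_eq_true, if_false]
        rw [ih t acc (by omega)]
        have : ¬ x = c := fun hxc => by simp [hxc] at hx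
        simp [this]

theorem pv_count_singleton (c : Char) (l : List Char) :
    PySem.Chars.count l [c] = l.count c := by
  rw [PySem.Chars.count]
  simpa using pv_count_go_singleton c l.length l 0 le_rfl


-- A's loop body as a countP: skip-if guard plus test-if increment
theorem pv_foldl_skip_if (P C : Int → Prop) [DecidablePred P] [DecidablePred C]
    (l : List Int) (a : Int) :
    l.foldl (fun acc p => if P p then acc else if C p then acc + 1 else acc) a
      = a + (l.countP (fun p => decide (¬ P p ∧ C p)) : Int) := by
  have h : (fun (acc : Int) p => if P p then acc else if C p then acc + 1 else acc)
      = fun (acc : Int) p => if (¬ P p ∧ C p) then acc + 1 else acc := by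
    funext acc p
    split_ifs <;> first | rfl | tauto
  rw [h, PySem.List.foldl_ite_add_one]

theorem pv_A_countP (word : String) :
    swap_q_for_k_check word =
      ((pvAPositions word (PySem.Str.count word "q") 0).countP
        (fun p => decide (¬(p = PySem.Str.len word - 1) ∧
          (PySem.List.pyGetD word.toList (p + 1) ' ' = 'u' ∧
           (PySem.List.pyGetD word.toList (p + 2) ' ' = 'e' ∨
            PySem.List.pyGetD word.toList (p + 2) ' ' = 'i')))) : Int) := by
  simp only [swap_q_for_k_check]
  rw [pv_foldl_skip_if]
  simp

theorem pv_B_countP (word : String) :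
    swap_q_for_k_check_alt word =
      ((List.range word.toList.length).countP
        (fun k => decide (word.toList.getD k ' ' = 'q' ∧
          (PySem.List.slice word.toList (some ((k : Int) + 1)) (some ((k : Int) + 3)) = ['u', 'e'] ∨
           PySem.List.slice word.toList (some ((k : Int) + 1)) (some ((k : Int) + 3)) = ['u', 'i']))) : Int) := by
  simp only [swap_q_for_k_check_alt]
  rw [PySem.List.foldl_ite_add_one, PySem.List.enumerate_eq_map_pyRange word.toList ' ',
    List.countP_map, PySem.List.pyRange_one, List.countP_map]
  simp only [PySem.List.len_eq, sub_zero, Int.toNat_natCast, zero_add]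
  congr 1
  apply List.countP_congr
  intro k hk
  simp only [List.mem_range] at hk
  simp [PySem.List.pyGetD_natCast, Function.comp]

-- first q at offset j of the suffix splits the filtered index range
theorem pv_filter_range_split (n s j : Nat) (q : Nat → Bool) (hjn : s + j < n) (hq : q (s + j) = true)
    (hmin : ∀ i, s ≤ i → i < s + j → q i = false) :
    (List.range n).filter (fun i => decide (s ≤ i) && q i) =
      (s + j) :: (List.range n).filter (fun i => decide (s + j + 1 ≤ i) && q i) := by
  obtain ⟨m, rfl⟩ : ∃ m, n = (s + j) + (1 + m) := ⟨n - (s + j) - 1, by omega⟩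
  have hr1 : List.range (1 + m) = 0 :: (List.range m).map (fun x => 1 + x) := by
    rw [List.range_add]; rfl
  rw [List.range_add, hr1]
  simp only [List.map_cons, List.map_map, List.filter_append, List.filter_cons]
  have e1 : (List.range (s + j)).filter (fun i => decide (s ≤ i) && q i) = [] := by
    rw [List.filter_eq_nil_iff]
    intro a ha
    simp only [List.mem_range] at ha
    by_cases hs' : s ≤ a
    · simp [hmin a hs' (by omega)]
    · simp [hs']
  have e2 : (List.range (s + j)).filter (fun i => decide (s + j + 1 ≤ i) && q i) = [] := by
    rw [List.filter_eq_nil_iff]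
    intro a ha
    simp only [List.mem_range] at ha
    have : ¬ (s + j + 1 ≤ a) := by omega
    simp [this]
  have e3 : ((List.range m).map ((fun i => s + j + i) ∘ fun x => 1 + x)).filter
        (fun i => decide (s ≤ i) && q i)
      = ((List.range m).map ((fun i => s + j + i) ∘ fun x => 1 + x)).filter
        (fun i => decide (s + j + 1 ≤ i) && q i) := by
    apply List.filter_congr
    intro a ha
    simp only [List.mem_map, Function.comp] at ha
    obtain ⟨x, _, rfl⟩ := ha
    have h1 : s ≤ s + j + (1 + x) := by omega
    have h2 : s + j + 1 ≤ s + j + (1 + x) := by omega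
    simp [h1, h2]
  rw [e1, e2, e3]
  simp only [Nat.add_zero, List.nil_append]
  rw [if_pos (by simp [hq]), if_neg (by simp)]

-- the while loop collects exactly the q-indices ≥ s, in order
theorem pv_positions_eq (word : String) : ∀ (c s : Nat), s ≤ word.toList.length →
    (word.toList.drop s).count 'q' = c →
    pvAPositions word c ((s : Nat) : Int) =
      ((List.range word.toList.length).filter
        (fun i => decide (s ≤ i) && (word.toList[i]? == some 'q'))).map (fun i => ((i : Nat) : Int)) := by
  intro c
  induction c with
  | zero =>
    intro s hs hc
    rw [pvAPositions]
    symm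
    simp only [List.map_eq_nil_iff, List.filter_eq_nil_iff]
    intro i hi
    simp only [List.mem_range] at hi
    by_cases hsi : s ≤ i
    · have hnq : 'q' ∉ word.toList.drop s := List.count_eq_zero.mp hc
      have : (word.toList.drop s)[i - s]? = word.toList[i]? := by
        rw [List.getElem?_drop]; congr 1; omega
      by_cases hqi : word.toList[i]? = some 'q'
      · exfalso; exact hnq (List.mem_of_getElem? (by rw [this, hqi]))
      · simp [hqi]
    · simp [hsi]
  | succ c ih =>
    intro s hs hc
    have hq : 'q' ∈ word.toList.drop s := List.count_pos_iff.mp (by omega)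
    have hinf : ['q'] <:+: word.toList.drop s := (List.singleton_infix_iff _ _).mpr hq
    have hne : PySem.Chars.find (word.toList.drop s) ['q'] ≠ -1 :=
      (PySem.Chars.find_ne_neg_one_iff _ _).mpr hinf
    have hge : 0 ≤ PySem.Chars.find (word.toList.drop s) ['q'] := by
      have := PySem.Chars.neg_one_le_find (word.toList.drop s) ['q']
      omega
    obtain ⟨hpref, hmin⟩ := PySem.Chars.find_spec (s := word.toList.drop s) (sub := ['q']) hge
    set j := (PySem.Chars.find (word.toList.drop s) ['q']).toNat with hjdef
    have hfj : PySem.Chars.find (word.toList.drop s) ['q'] = (j : Int) :=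
      (Int.toNat_of_nonneg hge).symm
    have hhead : ((word.toList.drop s).drop j).head? = some 'q' :=
      (pv_singleton_prefix_iff _ _).mp hpref
    have hidx : word.toList[s + j]? = some 'q' := by
      rw [List.drop_drop, List.head?_drop] at hhead
      exact hhead
    have hjlt : s + j < word.toList.length := by
      obtain ⟨h, _⟩ := List.getElem?_eq_some_iff.mp hidx
      exact h
    have hff : PySem.Chars.findFrom word.toList ['q'] ((s : Nat) : Int) none = ((s + j : Nat) : Int) := by
      rw [PySem.Chars.findFrom_natCast word.toList ['q'] s hs, if_neg hne, hfj]
      push_cast; ring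
    -- the fuel for the tail: the suffix past the found q has c q's
    have htake0 : ((word.toList.drop s).take j).count 'q' = 0 := by
      rw [List.count_eq_zero]
      intro hmem
      obtain ⟨i, hilt, hie⟩ := List.mem_iff_getElem.mp hmem
      have hij : i < j := by
        have := List.length_take_le j (word.toList.drop s)
        omega
      apply hmin i hij
      rw [pv_singleton_prefix_iff, List.head?_drop]
      rw [← List.getElem?_take_of_lt hij, List.getElem?_eq_getElem hilt, hie]
    have hdropsj : (word.toList.drop s).drop j = 'q' :: word.toList.drop (s + j + 1) := by
      rw [List.drop_drop]
      rw [List.drop_eq_getElem_cons hjlt]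
      obtain ⟨h, he⟩ := List.getElem?_eq_some_iff.mp hidx
      rw [he]
    have hcnt : (word.toList.drop (s + j + 1)).count 'q' = c := by
      have hsplit := List.take_append_drop j (word.toList.drop s)
      have := congrArg (List.count 'q') hsplit
      rw [List.count_append, htake0, hdropsj] at this
      simp only [List.count_cons] at this
      simp only [hc] at this
      simp at this
      omega
    rw [pvAPositions]
    have hffw : PySem.Str.findFrom word "q" ((s : Nat) : Int) = ((s + j : Nat) : Int) := by
      rw [PySem.Str.findFrom_eq]
      exact hff
    rw [hffw]
    have hcast : (((s + j : Nat) : Int)) + 1 = (((s + j + 1 : Nat)) : Int) := by push_cast; ring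
    rw [hcast, ih (s + j + 1) (by omega) hcnt]
    rw [pv_filter_range_split word.toList.length s j (fun i => word.toList[i]? == some 'q') hjlt
      (by simp [hidx])
      (by
        intro i hsi hilt
        have hh := hmin (i - s) (by omega)
        rw [pv_singleton_prefix_iff, List.head?_drop, List.getElem?_drop] at hh
        have : s + (i - s) = i := by omega
        rw [this] at hh
        simpa using hh)]
    simp

-- the per-index equivalence of A's guarded double lookup and B's slice comparison
theorem pv_pointwise (word : String) (hPre : ¬ (['q', 'u'] <:+ word.toList)) (i : Nat)
    (hi : i < word.toList.length) :
    ((¬(((i : Nat) : Int) = PySem.Str.len word - 1) ∧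
      (PySem.List.pyGetD word.toList (((i : Nat) : Int) + 1) ' ' = 'u' ∧
       (PySem.List.pyGetD word.toList (((i : Nat) : Int) + 2) ' ' = 'e' ∨
        PySem.List.pyGetD word.toList (((i : Nat) : Int) + 2) ' ' = 'i'))) ∧
      word.toList[i]? = some 'q')
    ↔ (word.toList.getD i ' ' = 'q' ∧
       (PySem.List.slice word.toList (some (((i : Nat) : Int) + 1)) (some (((i : Nat) : Int) + 3)) = ['u', 'e'] ∨
        PySem.List.slice word.toList (some (((i : Nat) : Int) + 1)) (some (((i : Nat) : Int) + 3)) = ['u', 'i'])) := by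
  have hlen : PySem.Str.len word = (word.toList.length : Int) := PySem.Str.len_eq word
  have hc1 : (((i : Nat) : Int) + 1) = (((i + 1 : Nat)) : Int) := by push_cast; ring
  have hc3 : (((i : Nat) : Int) + 3) = (((i + 3 : Nat)) : Int) := by push_cast; ring
  have hslice : PySem.List.slice word.toList (some (((i : Nat) : Int) + 1)) (some (((i : Nat) : Int) + 3))
      = (word.toList.drop (i + 1)).take 2 := by
    rw [hc1, hc3, PySem.List.slice_natCast]
    congr 1
    omega
  have hgetD : word.toList.getD i ' ' = word.toList[i] := List.getD_eq_getElem _ _ hi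
  have hgi : word.toList[i]? = some word.toList[i] := List.getElem?_eq_getElem hi
  by_cases hq : word.toList[i] = 'q'
  · rcases Nat.lt_or_ge (i + 2) word.toList.length with hlt | hge2
    · have h1 : PySem.List.pyGetD word.toList (((i : Nat) : Int) + 1) ' ' = word.toList[i + 1] := by
        rw [hc1, PySem.List.pyGetD_natCast, List.getD_eq_getElem _ _ (by omega)]
      have hc2 : (((i : Nat) : Int) + 2) = (((i + 2 : Nat)) : Int) := by push_cast; ring
      have h2 : PySem.List.pyGetD word.toList (((i : Nat) : Int) + 2) ' ' = word.toList[i + 2] := by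
        rw [hc2, PySem.List.pyGetD_natCast, List.getD_eq_getElem _ _ hlt]
      have hdrop : word.toList.drop (i + 1) = word.toList[i + 1] :: word.toList[i + 2] :: word.toList.drop (i + 3) := by
        rw [List.drop_eq_getElem_cons (by omega), List.drop_eq_getElem_cons (i := i + 2) hlt]
      have hne : ¬(((i : Nat) : Int) = (word.toList.length : Int) - 1) := by omega
      rw [hslice, hdrop]
      simp only [hlen, hne, not_false_iff, true_and, h1, h2, hgetD, hgi, hq,
        List.cons.injEq, and_true, List.take_succ_cons, List.take_zero]
      tauto
    · by_cases hlast : i + 1 = word.toList.length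
      · have hdrop : word.toList.drop (i + 1) = [] := List.drop_eq_nil_of_le (by omega)
        have hEq : (((i : Nat) : Int)) = (word.toList.length : Int) - 1 := by omega
        rw [hslice, hdrop]
        simp [hEq]
      · have hlen2 : word.toList.length = i + 2 := by omega
        have hnu : word.toList[i + 1]'(by omega) ≠ 'u' := by
          intro hu
          apply hPre
          have hd : word.toList.drop i = ['q', 'u'] := by
            rw [List.drop_eq_getElem_cons (by omega), List.drop_eq_getElem_cons (i := i + 1) (by omega),
              hq, hu, List.drop_eq_nil_of_le (by omega)]
          rw [← hd]
          exact List.drop_suffix i word.toList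
        have h1 : PySem.List.pyGetD word.toList (((i : Nat) : Int) + 1) ' ' = word.toList[i + 1]'(by omega) := by
          rw [hc1, PySem.List.pyGetD_natCast, List.getD_eq_getElem _ _ (by omega)]
        have hdrop : word.toList.drop (i + 1) = [word.toList[i + 1]'(by omega)] := by
          rw [List.drop_eq_getElem_cons (by omega), List.drop_eq_nil_of_le (by omega)]
        rw [hslice, hdrop]
        simp [h1, hnu]
  · simp only [hgi, Option.some.injEq, hgetD]
    simp [hq]

-- ===== VERDICT (by name: the statement is the Claim_ definition above) =====
theorem swap_q_for_k_check_spec : Claim_equal_swap_q_for_k_check := by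
  intro word _ hPre
  unfold Pre_swap_q_for_k_check at hPre
  unfold Spec_swap_q_for_k_check
  have hPre' : ¬ (['q', 'u'] <:+ word.toList) := by
    intro h
    rw [PySem.Str.endswith_eq] at hPre
    have hT : PySem.Chars.endswith word.toList ("qu" : String).toList = true :=
      (PySem.Chars.endswith_iff word.toList ("qu" : String).toList).mpr h
    rw [hT] at hPre
    simp at hPre
  rw [pv_A_countP, pv_B_countP]
  have hcount : PySem.Str.count word "q" = (word.toList.drop 0).count 'q' := by
    rw [PySem.Str.count_eq]
    have := pv_count_singleton 'q' word.toList
    simp only [List.drop_zero]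
    exact this
  rw [hcount]
  rw [(by simp : (0 : Int) = ((0 : Nat) : Int)), pv_positions_eq word _ 0 (by omega) rfl]
  rw [List.countP_map, List.countP_filter]
  congr 1
  apply List.countP_congr
  intro i hi
  simp only [List.mem_range] at hi
  have hpt := pv_pointwise word hPre' i hi
  constructor
  · intro hL
    simp only [Function.comp, Bool.and_eq_true, decide_eq_true_iff, beq_iff_eq] at hL
    exact decide_eq_true (hpt.mp ⟨hL.1, hL.2.2⟩)
  · intro hR
    have := hpt.mpr (of_decide_eq_true hR)
    simp only [Function.comp, Bool.and_eq_true, decide_eq_true_iff, beq_iff_eq]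
    exact ⟨this.1, by omega, this.2⟩

@[simp] theorem swap_q_for_k_check_raises : Claim_raises_swap_q_for_k_check := by
  unfold Claim_raises_swap_q_for_k_check
  constructor
  · intro word _ hr
    unfold Raises_swap_q_for_k_check at hr
    unfold Pre_swap_q_for_k_check
    intro h
    rw [hr] at h
    simp at h
  · exact ⟨by decide, by decide, by decide⟩
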